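-- pv_equiv track=rewrite | github.com/qinacme/qinacme-interview | 2018FT/linkedin_oa.py | odd_even_perm
-- ===== SOURCE A (Python) =====
-- def odd_even_perm(n):
--     res = []
--     def dfs(path, visited, is_odd):
--         if len(visited) == n:
--             res.append(path[:])
--         for i in range(1, n+1):
--             if i in visited or (i%2 == 0 and is_odd) or (i%2 == 1 and (not is_odd)):
--                 continue
--             visited.add(i)
--             path.append(i)
--             dfs(path, visited, not is_odd)
--             visited.remove(i)
--             path.pop()
--     if n % 2 == 0:
--         dfs([], set(), True)
--         dfs([], set(), False)
--         res.sort()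
--     else:
--         dfs([], set(), True)
--         res.sort()
--     return res
-- ===== SOURCE B (Python) =====
-- def odd_even_perm(n):
--     odds = list(range(1, n + 1, 2))
--     evens = list(range(2, n + 1, 2))
--
--     def perms(xs):
--         if not xs:
--             return [[]]
--         return [[x] + p
--                 for i, x in enumerate(xs)
--                 for p in perms(xs[:i] + xs[i + 1:])]
--
--     def interleave(first, second):
--         if not first:
--             return list(second)
--         return [first[0]] + interleave(second, first[1:])
--
--     patterns = [(odds, evens)]
--     if n % 2 == 0:
--         patterns.append((evens, odds))
--     res = []
--     for a, b in patterns: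
--         for pa in perms(a):
--             for pb in perms(b):
--                 perm = interleave(pa, pb)
--                 if len(perm) == n:
--                     res.append(perm)
--     res.sort()
--     return res
-- ===== Notes on version B (the rewrite author's own statement) =====
-- stated objective: alternative
-- what changed: Replaces A's backtracking DFS over a shared visited-set (rescanning 1..n at every node with a parity test) by a direct combinatorial construction: permutations of the odd values and of the even values are generated independently and each pair is interleaved (O,E,O,... and, for even n, also E,O,E,...), kept only when the interleaving has length n, then sorted.
import Mathlib
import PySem

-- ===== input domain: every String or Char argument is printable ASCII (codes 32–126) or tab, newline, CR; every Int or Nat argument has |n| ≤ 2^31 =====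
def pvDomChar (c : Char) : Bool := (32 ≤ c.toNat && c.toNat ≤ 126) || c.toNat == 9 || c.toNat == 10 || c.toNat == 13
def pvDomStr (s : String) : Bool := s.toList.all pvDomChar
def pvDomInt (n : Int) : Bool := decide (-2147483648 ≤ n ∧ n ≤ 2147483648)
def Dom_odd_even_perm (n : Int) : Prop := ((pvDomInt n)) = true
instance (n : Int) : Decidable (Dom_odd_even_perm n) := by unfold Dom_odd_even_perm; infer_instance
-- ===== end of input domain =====

-- B replaces A's backtracking DFS over a shared visited-set by interleaving independent
-- permutations of the odd and even values (alternative algorithm, similar cost).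

-- ===== PORT A =====
-- dfs(path, visited, is_odd); 'fuel' is a totality device (call sites pass n.toNat, one unit
-- per element added to visited); the fuel-0 fallback inside the loop is unreachable from the
-- top-level calls because visited grows by one on each recursive call.
def pvDfsA (n : Int) (fuel : Nat) (path : List Int) (visited : List Int) (isOdd : Bool) :
    List (List Int) :=
  (if (visited.length : Int) = n then [path] else []) ++
  (PySem.List.pyRange 1 (n + 1) 1).foldl
    (fun acc i =>
      if visited.contains i || (PySem.Int.mod i 2 == 0 && isOdd)
          || (PySem.Int.mod i 2 == 1 && !isOdd) then acc
      else
        match fuel with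
        | 0 => acc
        | f + 1 => acc ++ pvDfsA n f (path ++ [i]) (visited ++ [i]) (!isOdd))
    []
termination_by fuel

def odd_even_perm (n : Int) : List (List Int) :=
  if PySem.Int.mod n 2 = 0 then
    PySem.List.sorted (pvDfsA n n.toNat [] [] true ++ pvDfsA n n.toNat [] [] false)
      (fun x => x) false
  else
    PySem.List.sorted (pvDfsA n n.toNat [] [] true) (fun x => x) false

-- ===== PORT B =====
-- perms(xs) = [[x] + p for i, x in enumerate(xs) for p in perms(xs[:i] + xs[i+1:])];
-- 'fuel' is a totality device (call sites pass xs.length, the recursive list is one shorter).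
def pvPermsB : Nat → List Int → List (List Int)
  | _, [] => [[]]
  | 0, _ :: _ => []     -- unreachable: fuel = xs.length at every call
  | f + 1, x :: rest =>
    (PySem.List.enumerate (x :: rest) 0).flatMap (fun ix =>
      (pvPermsB f (PySem.List.slice (x :: rest) none (some ix.1) ++
                   PySem.List.slice (x :: rest) (some (ix.1 + 1)) none)).map
        (fun p => ix.2 :: p))

-- interleave(first, second) = second if first == [] else [first[0]] + interleave(second, first[1:])
def pvIleaveB : List Int → List Int → List Int
  | [], second => second
  | x :: rest, second => x :: pvIleaveB second rest
termination_by first second => first.length + second.length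
decreasing_by simp; omega

def odd_even_perm_alt (n : Int) : List (List Int) :=
  let odds := (PySem.List.pyRange 1 (n + 1) 1).filter (fun i => PySem.Int.mod i 2 == 1)
  let evens := (PySem.List.pyRange 1 (n + 1) 1).filter (fun i => PySem.Int.mod i 2 == 0)
  let patterns := [(odds, evens)] ++ (if PySem.Int.mod n 2 = 0 then [(evens, odds)] else [])
  let res := patterns.foldl
    (fun res ab =>
      (pvPermsB ab.1.length ab.1).foldl
        (fun res pa =>
          (pvPermsB ab.2.length ab.2).foldl
            (fun res pb =>
              if ((pvIleaveB pa pb).length : Int) = n then res ++ [pvIleaveB pa pb] else res)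
            res)
        res)
    []
  PySem.List.sorted res (fun x => x) false

-- ===== PRECONDITION & SPEC =====
-- Pre_ excludes large n (n > 980): A's dfs recurses once per element of 1..n, so there the first
-- depth-first descent overflows Python's recursion limit and A raises RecursionError before
-- returning anything; every input on which A returns a value is admitted.
def Pre_odd_even_perm (n : Int) : Prop := n ≤ 980
instance (n : Int) : Decidable (Pre_odd_even_perm n) := by unfold Pre_odd_even_perm; infer_instance
def pvWitness_odd_even_perm : Int := (6)

def Spec_odd_even_perm (n : Int) (out : List (List Int)) : Prop := out = odd_even_perm_alt n
instance (n : Int) (out : List (List Int)) : Decidable (Spec_odd_even_perm n out) := by unfold Spec_odd_even_perm; infer_instance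

-- ===== CLAIM (what is proved, stated in full; the proofs are below) =====
def Claim_equal_odd_even_perm : Prop := ∀ (n : Int), Dom_odd_even_perm n → Pre_odd_even_perm n → Spec_odd_even_perm n (odd_even_perm n)

-- ===== LEMMAS AND PROOFS =====

-- the common abstract recursion: alternating sequences drawing from pools O (odd turn) / E (even turn)
def pvAlt : Nat → List Int → List Int → Bool → List (List Int)
  | 0, O, E, _ => if O = [] ∧ E = [] then [[]] else []
  | f + 1, O, E, b =>
    if O = [] ∧ E = [] then [[]]
    else
      (if b then O else E).flatMap (fun x =>
        (pvAlt f (if b then O.erase x else O) (if b then E else E.erase x) (!b)).map (x :: ·))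

-- unvisited elements of 1..n with parity par
def pvRem (n : Int) (visited : List Int) (par : Int) : List Int :=
  (PySem.List.pyRange 1 (n + 1) 1).filter
    (fun i => !(visited.contains i) && (PySem.Int.mod i 2 == par))

theorem pv_foldl_skip_flatMap {α β : Type} (l : List α) (p : α → Bool) (g : α → List β)
    (acc : List β) :
    l.foldl (fun acc x => if p x then acc else acc ++ g x) acc =
      acc ++ (l.filter (fun x => !p x)).flatMap g := by
  induction l generalizing acc with
  | nil => simp
  | cons x l ih => by_cases h : p x <;> simp [h, ih]

theorem pv_foldl_id {α β : Type} (l : List α) (a : β) : l.foldl (fun acc _ => acc) a = a := by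
  induction l <;> simp_all

theorem pv_mod_two (i : Int) : i % 2 = 0 ∨ i % 2 = 1 := by omega

theorem pv_ileave_length (a b : List Int) : (pvIleaveB a b).length = a.length + b.length := by
  induction a, b using pvIleaveB.induct with
  | case1 second => simp [pvIleaveB]
  | case2 x rest second ih => rw [pvIleaveB]; simp [ih]; omega

theorem pv_flatMap_enumerate_snd {β : Type} (xs : List Int) (s : Int) (g : Int → List β) :
    (PySem.List.enumerate xs s).flatMap (fun ix => g ix.2) = xs.flatMap g := by
  induction xs generalizing s with
  | nil => simp [PySem.List.enumerate_nil]
  | cons x xs ih => simp [PySem.List.enumerate_cons, ih]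

theorem pv_perms_mem_length :
    ∀ (f : Nat) (xs : List Int), xs.length ≤ f →
      ∀ p ∈ pvPermsB f xs, p.length = xs.length := by
  intro f
  induction f with
  | zero =>
    intro xs hle p hp
    match xs, hle with
    | [], _ => simp [pvPermsB] at hp; simp [hp]
  | succ f ih =>
    intro xs hle p hp
    match xs with
    | [] => simp [pvPermsB] at hp; simp [hp]
    | x :: rest =>
      simp only [List.length_cons] at hle
      rw [pvPermsB] at hp
      simp only [List.mem_flatMap, List.mem_map] at hp
      obtain ⟨ix, hix, q, hq, rfl⟩ := hp
      rw [PySem.List.mem_enumerate_iff] at hix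
      obtain ⟨k, hk, rfl⟩ := hix
      simp only [List.length_cons] at hk
      simp only [zero_add] at hq ⊢
      have hsl : (PySem.List.slice (x :: rest) none (some (k : Int)) ++
          PySem.List.slice (x :: rest) (some ((k : Int) + 1)) none)
          = (x :: rest).take k ++ (x :: rest).drop (k + 1) := by
        rw [PySem.List.slice_to_natCast]
        rw [show ((k : Int) + 1) = ((k + 1 : Nat) : Int) by push_cast; ring]
        rw [PySem.List.slice_from_natCast]
      rw [hsl] at hq
      have hlen : ((x :: rest).take k ++ (x :: rest).drop (k + 1)).length = rest.length := by
        simp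
        omega
      have hql := ih _ (by rw [hlen]; omega) q hq
      rw [hlen] at hql
      simp [hql]

theorem pv_perms_unfold (O : List Int) (hne : O ≠ []) (hnd : O.Nodup) :
    pvPermsB O.length O =
      O.flatMap (fun x => (pvPermsB (O.length - 1) (O.erase x)).map (x :: ·)) := by
  match O, hne with
  | x :: rest, _ =>
    rw [show (x :: rest).length = rest.length + 1 from rfl, pvPermsB]
    have hbody : ∀ ix ∈ PySem.List.enumerate (x :: rest) 0,
        (pvPermsB rest.length (PySem.List.slice (x :: rest) none (some ix.1) ++
          PySem.List.slice (x :: rest) (some (ix.1 + 1)) none)).map (ix.2 :: ·)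
        = (pvPermsB ((x :: rest).length - 1) ((x :: rest).erase ix.2)).map (ix.2 :: ·) := by
      intro ix hix
      rw [PySem.List.mem_enumerate_iff] at hix
      obtain ⟨k, hk, rfl⟩ := hix
      simp only [zero_add]
      rw [PySem.List.slice_to_natCast,
        show ((k : Int) + 1) = ((k + 1 : Nat) : Int) by push_cast; ring,
        PySem.List.slice_from_natCast,
        ← List.eraseIdx_eq_take_drop_succ,
        ← List.Nodup.erase_getElem hnd k hk]
      rfl
    rw [List.flatMap_congr hbody]
    exact pv_flatMap_enumerate_snd (x :: rest) 0
      (fun v => (pvPermsB ((x :: rest).length - 1) ((x :: rest).erase v)).map (v :: ·))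

theorem pv_flatMap_cons_perm {α γ : Type} (l : List α) (f : α → γ) (g : α → List γ) :
    (l.flatMap (fun b => f b :: g b)).Perm (l.map f ++ l.flatMap g) := by
  induction l with
  | nil => simp
  | cons b l ih =>
    simp only [List.flatMap_cons, List.map_cons, List.cons_append]
    refine List.Perm.cons _ ?_
    refine (List.Perm.append_left (g b) ih).trans ?_
    refine List.perm_append_comm.trans ?_
    rw [List.append_assoc]
    exact List.Perm.append_left _ List.perm_append_comm

theorem pv_flatMap_swap_perm {α β γ : Type} (l₁ : List α) (l₂ : List β) (h : α → β → γ) :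
    (l₁.flatMap (fun a => l₂.map (fun b => h a b))).Perm
      (l₂.flatMap (fun b => l₁.map (fun a => h a b))) := by
  induction l₁ with
  | nil => simp
  | cons a l₁ ih =>
    simp only [List.flatMap_cons, List.map_cons]
    have h1 := pv_flatMap_cons_perm l₂ (fun b => h a b) (fun b => l₁.map (fun a => h a b))
    exact (List.Perm.append_left _ ih).trans h1.symm

theorem pv_hit_iff (n : Int) (hn : 0 ≤ n) (visited : List Int) (hnd : visited.Nodup)
    (hsub : ∀ x ∈ visited, x ∈ PySem.List.pyRange 1 (n + 1) 1) :
    ((visited.length : Int) = n ↔ (pvRem n visited 1 = [] ∧ pvRem n visited 0 = [])) := by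
  have hRlen : (PySem.List.pyRange 1 (n + 1) 1).length = n.toNat := by
    rw [PySem.List.length_pyRange_one]
    omega
  have hRnd : (PySem.List.pyRange 1 (n + 1) 1).Nodup := PySem.List.nodup_pyRange_one 1 (n + 1)
  have hcov : (pvRem n visited 1 = [] ∧ pvRem n visited 0 = []) ↔
      (∀ i ∈ PySem.List.pyRange 1 (n + 1) 1, i ∈ visited) := by
    simp only [pvRem, List.filter_eq_nil_iff]
    constructor
    · rintro ⟨h1, h0⟩ i hi
      by_contra hmem
      rcases pv_mod_two i with hm | hm
      · exact h0 i hi (by simp [hmem, hm])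
      · exact h1 i hi (by simp [hmem, hm])
    · intro h
      constructor <;> intro i hi <;> simp [h i hi]
  rw [hcov]
  constructor
  · intro hlen i hi
    by_contra hmem
    have hnd' : (i :: visited).Nodup := by simp [List.nodup_cons, hmem, hnd]
    have hsub' : (i :: visited) ⊆ PySem.List.pyRange 1 (n + 1) 1 := by
      intro y hy
      rcases List.mem_cons.mp hy with rfl | hy
      · exact hi
      · exact hsub y hy
    have hle := (hnd'.subperm hsub').length_le
    rw [hRlen] at hle
    simp only [List.length_cons] at hle
    omega
  · intro h
    have h1 := (hnd.subperm (fun y hy => hsub y hy)).length_le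
    have h2 := (hRnd.subperm (fun y hy => h y hy)).length_le
    rw [hRlen] at h1 h2
    omega

theorem pv_rem_append_same (n : Int) (visited : List Int) (i : Int) (p : Int)
    (hp : i % 2 = p) (hnd : (pvRem n visited p).Nodup) :
    pvRem n (visited ++ [i]) p = (pvRem n visited p).erase i := by
  rw [hnd.erase_eq_filter, pvRem, pvRem, List.filter_filter]
  apply List.filter_congr
  intro j _
  by_cases hj : j = i
  · subst hj
    simp
  · simp [hj]

theorem pv_rem_append_other (n : Int) (visited : List Int) (i : Int) (p q : Int)
    (hp : i % 2 = p) (hne : p ≠ q) :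
    pvRem n (visited ++ [i]) q = pvRem n visited q := by
  rw [pvRem, pvRem]
  apply List.filter_congr
  intro j _
  by_cases hj : j = i
  · subst hj
    simp [hp, hne]
  · simp [hj]

theorem pv_rem_nodup (n : Int) (visited : List Int) (p : Int) : (pvRem n visited p).Nodup :=
  List.Nodup.filter _ (PySem.List.nodup_pyRange_one 1 (n + 1))

theorem pv_rem_sub (n : Int) (visited : List Int) (p : Int) :
    ∀ x ∈ pvRem n visited p, x ∈ PySem.List.pyRange 1 (n + 1) 1 := by
  intro x hx
  exact List.mem_of_mem_filter hx

theorem pv_rem_pred (n : Int) (visited : List Int) (p : Int) :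
    ∀ x ∈ pvRem n visited p, x ∉ visited ∧ x % 2 = p := by
  intro x hx
  have h := List.of_mem_filter hx
  simp at h
  exact h

theorem pv_dfs_eq (n : Int) (hn : 0 ≤ n) :
    ∀ (fuel : Nat) (path visited : List Int) (b : Bool), visited.Nodup →
      (∀ x ∈ visited, x ∈ PySem.List.pyRange 1 (n + 1) 1) →
      pvDfsA n fuel path visited b =
        (pvAlt fuel (pvRem n visited 1) (pvRem n visited 0) b).map (fun w => path ++ w) := by
  intro fuel
  induction fuel with
  | zero =>
    intro path visited b hnd hsub
    rw [pvDfsA]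
    rw [show (fun (acc : List (List Int)) (i : Int) =>
        if visited.contains i || (PySem.Int.mod i 2 == 0 && b)
            || (PySem.Int.mod i 2 == 1 && !b) then acc
        else
          match (0 : Nat) with
          | 0 => acc
          | f + 1 => acc ++ pvDfsA n f (path ++ [i]) (visited ++ [i]) (!b))
        = (fun acc _ => acc) from by funext acc i; split <;> rfl]
    rw [pv_foldl_id]
    by_cases hhit : (visited.length : Int) = n
    · have h := (pv_hit_iff n hn visited hnd hsub).mp hhit
      simp [hhit, pvAlt, h.1, h.2]
    · have hne : ¬(pvRem n visited 1 = [] ∧ pvRem n visited 0 = []) := by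
        intro h
        exact hhit ((pv_hit_iff n hn visited hnd hsub).mpr h)
      simp [hhit, pvAlt, hne]
  | succ f ih =>
    intro path visited b hnd hsub
    rw [pvDfsA]
    rw [show (fun (acc : List (List Int)) (i : Int) =>
        if visited.contains i || (PySem.Int.mod i 2 == 0 && b)
            || (PySem.Int.mod i 2 == 1 && !b) then acc
        else
          match f + 1 with
          | 0 => acc
          | f' + 1 => acc ++ pvDfsA n f' (path ++ [i]) (visited ++ [i]) (!b))
        = (fun acc i =>
          if visited.contains i || (PySem.Int.mod i 2 == 0 && b)
              || (PySem.Int.mod i 2 == 1 && !b) then acc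
          else acc ++ pvDfsA n f (path ++ [i]) (visited ++ [i]) (!b)) from rfl]
    rw [pv_foldl_skip_flatMap]
    have hfilter : (PySem.List.pyRange 1 (n + 1) 1).filter
        (fun i => !(visited.contains i || (PySem.Int.mod i 2 == 0 && b)
            || (PySem.Int.mod i 2 == 1 && !b)))
        = pvRem n visited (if b then 1 else 0) := by
      rw [pvRem]
      apply List.filter_congr
      intro j _
      rcases pv_mod_two j with hm | hm <;> cases b <;> simp [hm]
    rw [hfilter]
    by_cases hhit : (visited.length : Int) = n
    · have hemp := (pv_hit_iff n hn visited hnd hsub).mp hhit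
      rw [pvAlt, if_pos hemp]
      have hremb : pvRem n visited (if b then 1 else 0) = [] := by
        cases b <;> simp [hemp.1, hemp.2]
      simp [hhit, hremb]
    · have hne : ¬(pvRem n visited 1 = [] ∧ pvRem n visited 0 = []) := by
        intro h
        exact hhit ((pv_hit_iff n hn visited hnd hsub).mpr h)
      rw [pvAlt, if_neg hne]
      have hstep : ∀ (i : Int), i ∉ visited → i ∈ PySem.List.pyRange 1 (n + 1) 1 →
          ((visited ++ [i]).Nodup ∧
           ∀ x ∈ visited ++ [i], x ∈ PySem.List.pyRange 1 (n + 1) 1) := by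
        intro i hmem hiR
        constructor
        · simp [List.nodup_append, hnd]
          intro a ha h
          subst h
          exact hmem ha
        · intro x hx
          rcases List.mem_append.mp hx with hx | hx
          · exact hsub x hx
          · simp at hx
            subst hx
            exact hiR
      cases b with
      | true =>
        have hbody : ∀ i ∈ pvRem n visited 1,
            pvDfsA n f (path ++ [i]) (visited ++ [i]) false
            = (pvAlt f ((pvRem n visited 1).erase i) (pvRem n visited 0) false).map
                (fun w => path ++ (i :: w)) := by
          intro i hi
          obtain ⟨hmem, hm⟩ := pv_rem_pred n visited 1 i hi
          obtain ⟨hnd', hsub'⟩ := hstep i hmem (pv_rem_sub n visited 1 i hi)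
          rw [show (false : Bool) = (!true) from rfl,
              ih (path ++ [i]) (visited ++ [i]) (!true) hnd' hsub',
              pv_rem_append_same n visited i 1 hm (pv_rem_nodup n visited 1),
              pv_rem_append_other n visited i 1 0 hm (by omega)]
          apply List.map_congr_left
          intro w _
          simp
        simp only [if_neg hhit, List.nil_append, Bool.not_true, Bool.not_false,
          eq_self_iff_true, if_true, Bool.false_eq_true, if_false]
        rw [List.flatMap_congr hbody]
        simp only [List.map_flatMap, List.map_map, Function.comp_def]
      | false =>
        have hbody : ∀ i ∈ pvRem n visited 0,
            pvDfsA n f (path ++ [i]) (visited ++ [i]) true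
            = (pvAlt f (pvRem n visited 1) ((pvRem n visited 0).erase i) true).map
                (fun w => path ++ (i :: w)) := by
          intro i hi
          obtain ⟨hmem, hm⟩ := pv_rem_pred n visited 0 i hi
          obtain ⟨hnd', hsub'⟩ := hstep i hmem (pv_rem_sub n visited 0 i hi)
          rw [show (true : Bool) = (!false) from rfl,
              ih (path ++ [i]) (visited ++ [i]) (!false) hnd' hsub',
              pv_rem_append_same n visited i 0 hm (pv_rem_nodup n visited 0),
              pv_rem_append_other n visited i 0 1 hm (by omega)]
          apply List.map_congr_left
          intro w _
          simp
        simp only [if_neg hhit, List.nil_append, Bool.not_true, Bool.not_false,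
          eq_self_iff_true, if_true, Bool.false_eq_true, if_false]
        rw [List.flatMap_congr hbody]
        simp only [List.map_flatMap, List.map_map, Function.comp_def]

theorem pv_alt_perm :
    ∀ (f : Nat) (O E : List Int), O.Nodup → E.Nodup → f = O.length + E.length →
      ((E.length ≤ O.length → O.length ≤ E.length + 1 →
        (pvAlt f O E true).Perm
          ((pvPermsB O.length O).flatMap (fun pa =>
            (pvPermsB E.length E).map (fun pb => pvIleaveB pa pb)))) ∧
       (O.length ≤ E.length → E.length ≤ O.length + 1 →
        (pvAlt f O E false).Perm
          ((pvPermsB E.length E).flatMap (fun pe =>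
            (pvPermsB O.length O).map (fun po => pvIleaveB pe po))))) := by
  intro f
  induction f with
  | zero =>
    intro O E _ _ hf
    have hO : O = [] := by
      cases O with
      | nil => rfl
      | cons x t => exact absurd hf (by simp <;> omega)
    subst hO
    have hE : E = [] := by
      cases E with
      | nil => rfl
      | cons x t => exact absurd hf (by simp <;> omega)
    subst hE
    constructor <;> intro _ _ <;> simp [pvAlt, pvPermsB, pvIleaveB]
  | succ f ih =>
    intro O E hOnd hEnd hf
    constructor
    · intro h1 h2
      have hOne : O ≠ [] := by
        intro h
        subst h
        simp at h1
        rw [h1] at hf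
        simp at hf
      have hne : ¬(O = [] ∧ E = []) := fun h => hOne h.1
      have hOpos : 0 < O.length := List.length_pos_of_ne_nil hOne
      rw [pvAlt, if_neg hne, pv_perms_unfold O hOne hOnd]
      rw [List.flatMap_assoc]
      simp only [List.flatMap_map, pvIleaveB, eq_self_iff_true, if_true,
        Bool.false_eq_true, if_false, Bool.not_true, Bool.not_false]
      refine List.Perm.flatMap (List.Perm.refl O) ?_
      intro x hx
      have hlen : (O.erase x).length = O.length - 1 := List.length_erase_of_mem hx
      rw [show O.length - 1 = (O.erase x).length from hlen.symm]
      have IH := (ih (O.erase x) E (hOnd.erase x) hEnd (by omega)).2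
        (by omega) (by omega)
      refine (IH.map (x :: ·)).trans ?_
      simp only [List.map_flatMap, List.map_map, Function.comp_def]
      exact (pv_flatMap_swap_perm (pvPermsB (O.erase x).length (O.erase x))
        (pvPermsB E.length E) (fun a b => x :: pvIleaveB b a)).symm
    · intro h1 h2
      have hEne : E ≠ [] := by
        intro h
        subst h
        simp at h1
        rw [h1] at hf
        simp at hf
      have hne : ¬(O = [] ∧ E = []) := fun h => hEne h.2
      have hEpos : 0 < E.length := List.length_pos_of_ne_nil hEne
      rw [pvAlt, if_neg hne, pv_perms_unfold E hEne hEnd]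
      rw [List.flatMap_assoc]
      simp only [List.flatMap_map, pvIleaveB, eq_self_iff_true, if_true,
        Bool.false_eq_true, if_false, Bool.not_true, Bool.not_false]
      refine List.Perm.flatMap (List.Perm.refl E) ?_
      intro x hx
      have hlen : (E.erase x).length = E.length - 1 := List.length_erase_of_mem hx
      rw [show E.length - 1 = (E.erase x).length from hlen.symm]
      have IH := (ih O (E.erase x) hOnd (hEnd.erase x) (by omega)).1
        (by omega) (by omega)
      refine (IH.map (x :: ·)).trans ?_
      simp only [List.map_flatMap, List.map_map, Function.comp_def]
      exact pv_flatMap_swap_perm (pvPermsB O.length O)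
        (pvPermsB (E.erase x).length (E.erase x)) (fun a b => x :: pvIleaveB a b)

theorem pv_len_parity (m : Nat) :
    ((PySem.List.pyRange 1 ((m : Int) + 1) 1).filter
      (fun i => PySem.Int.mod i 2 == 1)).length = (m + 1) / 2 ∧
    ((PySem.List.pyRange 1 ((m : Int) + 1) 1).filter
      (fun i => PySem.Int.mod i 2 == 0)).length = m / 2 := by
  induction m with
  | zero =>
    rw [show ((0 : Nat) : Int) + 1 = 1 by simp, PySem.List.pyRange_one_eq_nil (by omega)]
    simp
  | succ m ih =>
    obtain ⟨ih1, ih0⟩ := ih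
    have hm2 : PySem.Int.mod ((m : Int) + 1) 2 = ((m : Int) + 1) % 2 :=
      PySem.Int.mod_eq_emod_of_pos (by omega)
    have hcast : (((m + 1 : Nat)) : Int) + 1 = ((m : Int) + 1) + 1 := by push_cast; ring
    constructor
    · rw [hcast, PySem.List.pyRange_one_succ_right (by omega), List.filter_append,
        List.length_append, ih1]
      rcases pv_mod_two ((m : Int) + 1) with h | h
      · rw [show List.filter (fun i => PySem.Int.mod i 2 == 1) [(m : Int) + 1] = [] from by
          simp [hm2, h]]
        simp
        omega
      · rw [show List.filter (fun i => PySem.Int.mod i 2 == 1) [(m : Int) + 1]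
            = [(m : Int) + 1] from by simp [hm2, h]]
        simp
        omega
    · rw [hcast, PySem.List.pyRange_one_succ_right (by omega), List.filter_append,
        List.length_append, ih0]
      rcases pv_mod_two ((m : Int) + 1) with h | h
      · rw [show List.filter (fun i => PySem.Int.mod i 2 == 0) [(m : Int) + 1]
            = [(m : Int) + 1] from by simp [hm2, h]]
        simp
        omega
      · rw [show List.filter (fun i => PySem.Int.mod i 2 == 0) [(m : Int) + 1] = [] from by
          simp [hm2, h]]
        simp
        omega

theorem pv_block_eq (n : Int) (a b : List Int)
    (hab : (a.length : Int) + (b.length : Int) = n) (res : List (List Int)) :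
    (pvPermsB a.length a).foldl
      (fun res pa => (pvPermsB b.length b).foldl
        (fun res pb => if ((pvIleaveB pa pb).length : Int) = n then res ++ [pvIleaveB pa pb]
          else res) res) res
    = res ++ (pvPermsB a.length a).flatMap (fun pa =>
        (pvPermsB b.length b).map (fun pb => pvIleaveB pa pb)) := by
  have hcong := PySem.List.foldl_congr_mem (pvPermsB a.length a)
      (fun res pa => (pvPermsB b.length b).foldl
        (fun res pb => if ((pvIleaveB pa pb).length : Int) = n then res ++ [pvIleaveB pa pb]
          else res) res)
      (fun res pa => res ++ (pvPermsB b.length b).map (fun pb => pvIleaveB pa pb)) res ?_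
  · rw [hcong, PySem.List.foldl_append_eq_flatMap]
  · intro acc pa hpa
    dsimp only
    rw [PySem.List.foldl_append_ite (fun pb => ((pvIleaveB pa pb).length : Int) = n)
      (fun pb => pvIleaveB pa pb)]
    have hfilt : (pvPermsB b.length b).filter
        (fun pb => decide (((pvIleaveB pa pb).length : Int) = n)) = pvPermsB b.length b := by
      rw [List.filter_eq_self]
      intro q hq
      have h1 := pv_perms_mem_length a.length a le_rfl pa hpa
      have h2 := pv_perms_mem_length b.length b le_rfl q hq
      simp only [pv_ileave_length, h1, h2, decide_eq_true_eq]
      push_cast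
      push_cast at hab
      omega
    rw [hfilt]

theorem pv_sorted_perm (xs ys : List (List Int)) (h : xs.Perm ys) :
    PySem.List.sorted xs (fun x => x) false = PySem.List.sorted ys (fun x => x) false := by
  have hD : (fun (a b : List Int) => a.decidableLT b)
      = (LinearOrder.toDecidableLT : DecidableLT (List Int)) := by
    funext a b
    exact Subsingleton.elim _ _
  have h2 := (PySem.List.sorted_id_eq_sorted_id_iff_perm xs ys).mpr h
  exact hD ▸ h2

theorem odd_even_perm_spec : Claim_equal_odd_even_perm := by
  unfold Claim_equal_odd_even_perm
  intro n hdom hpre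
  unfold Spec_odd_even_perm
  by_cases hn0 : n < 0
  · have hr : PySem.List.pyRange 1 (n + 1) 1 = [] := PySem.List.pyRange_one_eq_nil (by omega)
    have hz : ¬((0 : Int) = n) := by omega
    have hdfs : ∀ b, pvDfsA n n.toNat [] [] b = [] := by
      intro b
      have hc : ¬(((([] : List Int).length : Int)) = n) := by simpa using hz
      rw [pvDfsA, hr, if_neg hc]
      simp
    by_cases hpar : PySem.Int.mod n 2 = 0
    · have hd : (2 : Int) ∣ n := by rwa [PySem.Int.mod_eq_zero_iff_dvd] at hpar
      simp [odd_even_perm, odd_even_perm_alt, hpar, hr, hdfs, pvPermsB, pvIleaveB, hz, hd]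
    · have hd : ¬((2 : Int) ∣ n) := by rwa [PySem.Int.mod_eq_zero_iff_dvd] at hpar
      simp [odd_even_perm, odd_even_perm_alt, hpar, hr, hdfs, pvPermsB, pvIleaveB, hz, hd]
  · have hn : 0 ≤ n := by omega
    obtain ⟨m, rfl⟩ : ∃ m : Nat, n = (m : Int) := ⟨n.toNat, (Int.toNat_of_nonneg (by omega)).symm⟩
    obtain ⟨hOlen, hElen⟩ := pv_len_parity m
    simp only [odd_even_perm, odd_even_perm_alt, Int.toNat_natCast]
    set O := (PySem.List.pyRange 1 ((m : Int) + 1) 1).filter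
      (fun i => PySem.Int.mod i 2 == 1) with hOdef
    set E := (PySem.List.pyRange 1 ((m : Int) + 1) 1).filter
      (fun i => PySem.Int.mod i 2 == 0) with hEdef
    have hOnd : O.Nodup := List.Nodup.filter _ (PySem.List.nodup_pyRange_one 1 ((m : Int) + 1))
    have hEnd : E.Nodup := List.Nodup.filter _ (PySem.List.nodup_pyRange_one 1 ((m : Int) + 1))
    have hdfs : ∀ b, pvDfsA (m : Int) m [] [] b = pvAlt m O E b := by
      intro b
      rw [pv_dfs_eq (m : Int) (by omega) m [] [] b List.nodup_nil (by simp),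
          show pvRem (m : Int) [] 1 = O from by
            rw [hOdef, pvRem]; apply List.filter_congr; intro j _; simp,
          show pvRem (m : Int) [] 0 = E from by
            rw [hEdef, pvRem]; apply List.filter_congr; intro j _; simp]
      simp
    have harm := pv_alt_perm m O E hOnd hEnd (by omega)
    by_cases hpar : PySem.Int.mod (m : Int) 2 = 0
    · have hm2 : m % 2 = 0 := by
        rw [PySem.Int.mod_eq_emod_of_pos (by omega)] at hpar
        omega
      simp only [if_pos hpar, List.singleton_append, List.foldl_cons, List.foldl_nil]
      rw [pv_block_eq (m : Int) O E (by push_cast; omega) [],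
          pv_block_eq (m : Int) E O (by push_cast; omega) _, List.nil_append]
      refine pv_sorted_perm _ _ ?_
      rw [hdfs, hdfs]
      exact List.Perm.append (harm.1 (by omega) (by omega)) (harm.2 (by omega) (by omega))
    · have hm2 : m % 2 = 1 := by
        rw [PySem.Int.mod_eq_emod_of_pos (by omega)] at hpar
        omega
      simp only [if_neg hpar, List.append_nil, List.foldl_cons, List.foldl_nil]
      rw [pv_block_eq (m : Int) O E (by push_cast; omega) [], List.nil_append]
      refine pv_sorted_perm _ _ ?_
      rw [hdfs]
      exact harm.1 (by omega) (by omega)
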